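-- pv_equiv track=rewrite | github.com/VaitaR/local-cli-orchestrator | src/orx/context/snippets.py | extract_spec_highlights
-- ===== SOURCE A (Python) =====
-- def extract_spec_highlights(spec: str, max_lines: int = 120) -> str:
--     """Extract key sections from a spec for focused prompts."""
--     if not spec:
--         return ""
--
--     headings = {"acceptance", "acceptance criteria", "constraints", "technical constraints"}
--     lines = spec.splitlines()
--     selected: list[str] = []
--     capturing = False
--
--     for line in lines:
--         stripped = line.strip()
--         if stripped.startswith("#"):
--             title = stripped.lstrip("#").strip().lower()
--             capturing = title in headings
--             if capturing:
--                 selected.append(line)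
--             continue
--         if capturing:
--             selected.append(line)
--
--     if not selected:
--         selected = lines[:max_lines]
--     else:
--         selected = selected[:max_lines]
--
--     return "\n".join(selected).strip()
-- ===== SOURCE B (Python) =====
-- def extract_spec_highlights(spec: str, max_lines: int = 120) -> str:
--     """Extract key sections from a spec for focused prompts."""
--     if not spec:
--         return ""
--
--     headings = {"acceptance", "acceptance criteria", "constraints", "technical constraints"}
--     lines = spec.splitlines()
--
--     # Pass 1: group lines into heading-delimited sections (headless preamble first).
--     sections = []
--     title, body = None, []
--     for line in lines:
--         stripped = line.strip()
--         if stripped.startswith("#"):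
--             sections.append((title, body))
--             title = stripped.lstrip("#").strip().lower()
--             body = [line]
--         else:
--             body.append(line)
--     sections.append((title, body))
--
--     # Pass 2: keep, in order, the lines of every section whose title matches.
--     selected = [ln for t, b in sections if t in headings for ln in b]
--     if not selected:
--         selected = lines
--     return "\n".join(selected[:max_lines]).strip()
-- ===== Notes on version B (the rewrite author's own statement) =====
-- stated objective: alternative
-- what changed: Replaced A's single interleaved loop with a mutable capturing flag by a two-pass decomposition: first group the lines into heading-delimited sections (headless preamble first), then concatenate the line-lists of the sections whose title matches.
import Mathlib
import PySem

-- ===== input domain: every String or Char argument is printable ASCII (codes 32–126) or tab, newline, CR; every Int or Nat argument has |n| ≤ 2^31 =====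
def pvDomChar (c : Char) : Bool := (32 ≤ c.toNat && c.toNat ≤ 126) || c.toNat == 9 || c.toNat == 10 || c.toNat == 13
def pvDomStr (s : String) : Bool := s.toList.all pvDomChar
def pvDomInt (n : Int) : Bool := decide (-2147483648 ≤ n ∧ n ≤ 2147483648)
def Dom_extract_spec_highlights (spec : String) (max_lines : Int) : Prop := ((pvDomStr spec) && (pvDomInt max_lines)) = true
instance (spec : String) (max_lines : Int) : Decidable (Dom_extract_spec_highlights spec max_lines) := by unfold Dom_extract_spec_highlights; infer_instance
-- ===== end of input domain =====

-- B replaces A's one interleaved capture loop by a two-pass decomposition (group lines into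
-- heading sections, then concatenate matching sections); same cost, different structure.

-- ===== PORT A =====
def pvHeadings : PySem.Set String :=
  PySem.Set.ofList ["acceptance", "acceptance criteria", "constraints", "technical constraints"]

-- stripped.lstrip("#").strip().lower(); lstrip("#") is ported by hand as dropWhile (· == '#'),
-- exact because the stripped-characters set is the single character '#'.
def pvTitleOf (stripped : String) : String :=
  PySem.Str.lower (String.ofList (PySem.Chars.strip (stripped.toList.dropWhile (· == '#'))))

def pvStepA (st : List String × Bool) (line : String) : List String × Bool :=
  let stripped := PySem.Str.strip line
  if PySem.Str.startswith stripped "#" then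
    let title := pvTitleOf stripped
    let capturing := PySem.Set.contains pvHeadings title
    (if capturing then st.1 ++ [line] else st.1, capturing)
  else
    if st.2 then (st.1 ++ [line], st.2) else st

def extract_spec_highlights (spec : String) (max_lines : Int) : String :=
  if spec = "" then ""
  else
    let lines := PySem.Str.splitlines spec
    let st := lines.foldl pvStepA ([], false)
    let selected :=
      if st.1 = [] then PySem.List.slice lines none (some max_lines)
      else PySem.List.slice st.1 none (some max_lines)
    PySem.Str.strip (PySem.Str.join "\n" selected)

-- ===== PORT B =====
def pvSections (title : Option String) (body : List String) : List String → List (Option String × List String)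
  | [] => [(title, body)]
  | line :: rest =>
    let stripped := PySem.Str.strip line
    if PySem.Str.startswith stripped "#" then
      (title, body) :: pvSections (some (pvTitleOf stripped)) [line] rest
    else
      pvSections title (body ++ [line]) rest

def pvTMatch : Option String → Bool
  | none => false
  | some t => PySem.Set.contains pvHeadings t

def extract_spec_highlights_alt (spec : String) (max_lines : Int) : String :=
  if spec = "" then ""
  else
    let lines := PySem.Str.splitlines spec
    let sections := pvSections none [] lines
    let selected := ((sections.filter (fun s => pvTMatch s.1)).map (·.2)).flatten
    let selected := if selected = [] then lines else selected
    PySem.Str.strip (PySem.Str.join "\n" (PySem.List.slice selected none (some max_lines)))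

-- ===== PRECONDITION & SPEC =====
def Spec_extract_spec_highlights (spec : String) (max_lines : Int) (out : String) : Prop := out = extract_spec_highlights_alt spec max_lines
instance (spec : String) (max_lines : Int) (out : String) : Decidable (Spec_extract_spec_highlights spec max_lines out) := by unfold Spec_extract_spec_highlights; infer_instance

-- ===== CLAIM (what is proved, stated in full; the proofs are below) =====
def Claim_equal_extract_spec_highlights : Prop := ∀ (spec : String) (max_lines : Int), Dom_extract_spec_highlights spec max_lines → Spec_extract_spec_highlights spec max_lines (extract_spec_highlights spec max_lines)

-- ===== LEMMAS AND PROOFS =====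

-- One step of A's loop splits off the accumulator; the flag is independent of it.
theorem stepA_split (p : List String × Bool) (line : String) :
    pvStepA p line = (p.1 ++ (pvStepA ([], p.2) line).1, (pvStepA ([], p.2) line).2) := by
  simp only [pvStepA]
  split_ifs <;> simp

-- A's whole loop splits off the accumulator.
theorem foldA_acc (ls : List String) (p : List String × Bool) :
    ls.foldl pvStepA p = (p.1 ++ (ls.foldl pvStepA ([], p.2)).1, (ls.foldl pvStepA ([], p.2)).2) := by
  induction ls generalizing p with
  | nil => simp
  | cons line rest ih =>
    rw [List.foldl_cons, List.foldl_cons, ih (pvStepA p line), ih (pvStepA ([], p.2) line),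
      stepA_split p line]
    simp

-- What A's step does on an empty accumulator, phrased with B's section-title match.
theorem stepA_heading (line : String) (c : Bool)
    (h : PySem.Str.startswith (PySem.Str.strip line) "#" = true) :
    pvStepA ([], c) line
      = ((if pvTMatch (some (pvTitleOf (PySem.Str.strip line))) then [line] else []),
         pvTMatch (some (pvTitleOf (PySem.Str.strip line)))) := by
  simp only [pvStepA, pvTMatch, h, if_true, List.nil_append]
  rfl

theorem stepA_plain (line : String) (c : Bool)
    (h : ¬ PySem.Str.startswith (PySem.Str.strip line) "#" = true) :
    pvStepA ([], c) line = ((if c then [line] else []), c) := by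
  simp only [pvStepA, h, List.nil_append]
  cases c <;> simp

-- The flattened matching sections equal the current section's kept body followed by
-- what A's loop captures from the remaining lines.
theorem key_sections (ls : List String) (title : Option String) (body : List String) :
    (((pvSections title body ls).filter (fun s => pvTMatch s.1)).map (·.2)).flatten
      = (if pvTMatch title then body else []) ++ (ls.foldl pvStepA ([], pvTMatch title)).1 := by
  induction ls generalizing title body with
  | nil =>
    simp only [pvSections, List.foldl_nil, List.append_nil]
    by_cases h : pvTMatch title <;> simp [h, List.filter]
  | cons line rest ih =>
    by_cases h : PySem.Str.startswith (PySem.Str.strip line) "#" = true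
    · have hsec : pvSections title body (line :: rest)
          = (title, body) :: pvSections (some (pvTitleOf (PySem.Str.strip line))) [line] rest := by
        simp only [pvSections, h, if_true]
      rw [hsec, List.foldl_cons, stepA_heading line _ h, foldA_acc]
      by_cases hp : pvTMatch title
      · simp only [List.filter_cons, hp, if_true, List.map_cons, List.flatten_cons]
        rw [ih]
      · simp only [List.filter_cons, hp, Bool.false_eq_true, if_false]
        rw [ih]
        by_cases hm : pvTMatch (some (pvTitleOf (PySem.Str.strip line))) <;> simp [hm]
    · have hsec : pvSections title body (line :: rest)
          = pvSections title (body ++ [line]) rest := by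
        simp only [pvSections, h, Bool.false_eq_true, if_false]
      rw [hsec, List.foldl_cons, stepA_plain line _ h, foldA_acc, ih]
      by_cases hp : pvTMatch title <;> simp [hp]

-- ===== VERDICT (by name: the statement is the Claim_ definition above) =====
theorem extract_spec_highlights_spec : Claim_equal_extract_spec_highlights := by
  intro spec max_lines _
  unfold Spec_extract_spec_highlights extract_spec_highlights extract_spec_highlights_alt
  by_cases hs : spec = ""
  · simp [hs]
  · simp only [hs, if_false]
    have hkey := key_sections (PySem.Str.splitlines spec) none []
    rw [show pvTMatch none = false from rfl] at hkey
    simp only [Bool.false_eq_true, if_false, List.nil_append] at hkey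
    rw [hkey]
    by_cases he : ((PySem.Str.splitlines spec).foldl pvStepA ([], false)).1 = []
    · simp [he]
    · simp [he]
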